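-- pv_equiv track=rewrite | github.com/sesterhe/MS_analysis | pdb_functions.py | reduce_ss
-- ===== SOURCE A (Python) =====
-- def reduce_ss(ss):
--     ss_reduced = []
--     for s in ss:
--         s =s.replace("G","H")
--         s =s.replace("I","H")
--         s =s.replace("B","E")
--         s =s.replace("T","x")
--         s =s.replace("S","x")
--         s =s.replace("C","x")
--         s =s.replace("L","x")
--         ss_reduced.append(s)
--     sss = "".join(ss_reduced)
--     return sss
-- ===== SOURCE B (Python) =====
-- _SS_TABLE = str.maketrans("GIBTSCL", "HHExxxx")
--
-- def reduce_ss(ss):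
--     return "".join(s.translate(_SS_TABLE) for s in ss)
-- ===== Notes on version B (the rewrite author's own statement) =====
-- stated objective: idiomatic
-- what changed: Replaces the seven chained str.replace scans per element (with a list accumulator and final join) by a single precomputed translation table applied once per string via str.translate inside one join.
import Mathlib
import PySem

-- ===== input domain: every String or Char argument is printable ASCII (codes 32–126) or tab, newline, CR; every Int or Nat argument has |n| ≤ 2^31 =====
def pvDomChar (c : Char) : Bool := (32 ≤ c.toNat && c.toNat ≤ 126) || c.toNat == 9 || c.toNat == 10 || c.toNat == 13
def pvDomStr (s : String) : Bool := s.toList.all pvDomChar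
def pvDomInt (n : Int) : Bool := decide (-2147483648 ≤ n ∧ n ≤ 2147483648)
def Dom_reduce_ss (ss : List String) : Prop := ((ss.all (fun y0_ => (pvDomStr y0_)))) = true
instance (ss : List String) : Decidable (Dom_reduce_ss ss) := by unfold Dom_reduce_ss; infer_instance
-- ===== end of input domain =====

-- B replaces A's seven chained .replace scans by one precomputed translation table applied in a single pass per string (idiomatic; same return value).

-- ===== PORT A =====
def reduce_ss (ss : List String) : String :=
  let ss_reduced := ss.foldl (fun acc s =>
    let s := PySem.Str.replace s "G" "H"
    let s := PySem.Str.replace s "I" "H"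
    let s := PySem.Str.replace s "B" "E"
    let s := PySem.Str.replace s "T" "x"
    let s := PySem.Str.replace s "S" "x"
    let s := PySem.Str.replace s "C" "x"
    let s := PySem.Str.replace s "L" "x"
    acc ++ [s]) []
  PySem.Str.join "" ss_reduced

-- ===== PORT B =====
-- the precomputed translation table _SS_TABLE (str.maketrans("GIBTSCL","HHExxxx"))
def pvSSTable : PySem.Dict Char Char :=
  PySem.Dict.mk [('G','H'),('I','H'),('B','E'),('T','x'),('S','x'),('C','x'),('L','x')]

-- s.translate(table): map each character through the table, identity if absent
def pvTranslate (c : Char) : Char := PySem.Dict.getD pvSSTable c c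

def reduce_ss_alt (ss : List String) : String :=
  PySem.Str.join "" (ss.map (fun s => String.ofList (s.toList.map pvTranslate)))

-- ===== PRECONDITION & SPEC =====
def Spec_reduce_ss (ss : List String) (out : String) : Prop := out = reduce_ss_alt ss
instance (ss : List String) (out : String) : Decidable (Spec_reduce_ss ss out) := by unfold Spec_reduce_ss; infer_instance

-- ===== CLAIM (what is proved, stated in full; the proofs are below) =====
def Claim_equal_reduce_ss : Prop := ∀ (ss : List String), Dom_reduce_ss ss → Spec_reduce_ss ss (reduce_ss ss)

-- ===== LEMMAS AND PROOFS =====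

-- single-character replace is a character map
theorem replace_go_single (a b : Char) :
    ∀ (l acc : List Char) (fuel : Nat), l.length ≤ fuel →
      PySem.Chars.replace.go [a] [b] fuel l acc
        = acc.reverse ++ l.map (fun c => if c = a then b else c) := by
  intro l
  induction l with
  | nil =>
      intro acc fuel _
      cases fuel <;> simp [PySem.Chars.replace.go]
  | cons c t ih =>
      intro acc fuel h
      cases fuel with
      | zero => simp at h
      | succ fuel =>
        have hle : t.length ≤ fuel := by simpa using h
        by_cases hc : c = a
        · have hp : [a].isPrefixOf (c :: t) = true := by simp [List.isPrefixOf, hc]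
          rw [PySem.Chars.replace.go, if_pos hp]
          simp only [List.length_cons, List.length_nil, List.drop_succ_cons, List.drop_zero,
            List.reverse_cons, List.reverse_nil, List.nil_append, List.singleton_append]
          rw [ih (b :: acc) fuel hle]
          simp [hc]
        · have hp : [a].isPrefixOf (c :: t) = false := by
            simp [List.isPrefixOf]; exact fun h' => (hc h'.symm).elim
          rw [PySem.Chars.replace.go, if_neg (by simp [hp])]
          rw [ih (c :: acc) fuel hle]
          simp [hc]

theorem replace_single (a b : Char) (l : List Char) :
    PySem.Chars.replace l [a] [b] = l.map (fun c => if c = a then b else c) := by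
  simp [PySem.Chars.replace]
  exact replace_go_single a b l [] l.length le_rfl

-- the seven chained single-char replaces equal one pass through the table
set_option maxHeartbeats 1600000 in
theorem chain_eq_translate (l : List Char) :
    (((((((l.map (fun c => if c = 'G' then 'H' else c)).map
        (fun c => if c = 'I' then 'H' else c)).map
        (fun c => if c = 'B' then 'E' else c)).map
        (fun c => if c = 'T' then 'x' else c)).map
        (fun c => if c = 'S' then 'x' else c)).map
        (fun c => if c = 'C' then 'x' else c)).map
        (fun c => if c = 'L' then 'x' else c))
      = l.map pvTranslate := by
  simp only [List.map_map]
  apply List.map_congr_left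
  intro c _
  simp only [Function.comp_apply]
  by_cases h1 : c = 'G'; · subst h1; decide
  by_cases h2 : c = 'I'; · subst h2; decide
  by_cases h3 : c = 'B'; · subst h3; decide
  by_cases h4 : c = 'T'; · subst h4; decide
  by_cases h5 : c = 'S'; · subst h5; decide
  by_cases h6 : c = 'C'; · subst h6; decide
  by_cases h7 : c = 'L'; · subst h7; decide
  have hG : ('G' == c) = false := by simp; exact fun h => h1 h.symm
  have hI : ('I' == c) = false := by simp; exact fun h => h2 h.symm
  have hB : ('B' == c) = false := by simp; exact fun h => h3 h.symm
  have hT : ('T' == c) = false := by simp; exact fun h => h4 h.symm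
  have hS : ('S' == c) = false := by simp; exact fun h => h5 h.symm
  have hC : ('C' == c) = false := by simp; exact fun h => h6 h.symm
  have hL : ('L' == c) = false := by simp; exact fun h => h7 h.symm
  simp [pvTranslate, pvSSTable, PySem.Dict.getD, PySem.Dict.get?,
    hG, hI, hB, hT, hS, hC, hL, h1, h2, h3, h4, h5, h6, h7]

-- A's per-element transformation equals B's
theorem elem_eq (s : String) :
    PySem.Str.replace (PySem.Str.replace (PySem.Str.replace (PySem.Str.replace
      (PySem.Str.replace (PySem.Str.replace (PySem.Str.replace s "G" "H")
        "I" "H") "B" "E") "T" "x") "S" "x") "C" "x") "L" "x"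
    = String.ofList (s.toList.map pvTranslate) := by
  have hG : ("G" : String).toList = ['G'] := rfl
  have hH : ("H" : String).toList = ['H'] := rfl
  have hI : ("I" : String).toList = ['I'] := rfl
  have hB : ("B" : String).toList = ['B'] := rfl
  have hE : ("E" : String).toList = ['E'] := rfl
  have hT : ("T" : String).toList = ['T'] := rfl
  have hS : ("S" : String).toList = ['S'] := rfl
  have hC : ("C" : String).toList = ['C'] := rfl
  have hL : ("L" : String).toList = ['L'] := rfl
  have hx : ("x" : String).toList = ['x'] := rfl
  simp only [PySem.Str.replace, String.toList_ofList, hG, hH, hI, hB, hE, hT, hS, hC, hL, hx,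
    replace_single]
  rw [chain_eq_translate]

-- A's append-accumulator loop builds the map
theorem foldl_append_map {α β : Type} (f : α → β) :
    ∀ (l : List α) (acc : List β),
      l.foldl (fun acc s => acc ++ [f s]) acc = acc ++ l.map f := by
  intro l
  induction l with
  | nil => intro acc; simp
  | cons x t ih => intro acc; simp [List.foldl, ih]

-- ===== VERDICT (by name: the statement is the Claim_ definition above) =====
theorem reduce_ss_spec : Claim_equal_reduce_ss := by
  intro ss _
  unfold Spec_reduce_ss reduce_ss reduce_ss_alt
  simp only [foldl_append_map, List.nil_append, elem_eq]
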